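-- pv_equiv track=rewrite | github.com/abhinavabcd/QuizApp_server | db/utils.py | getTagsFromString
-- ===== SOURCE A (Python) =====
-- def getTagsFromString(s,toLower=True):
--     ret = []
--     a = s.split("\n")
--     for i in a:
--         for j in i.split(","):
--             t = j.strip()
--             if(not t):#empty not tolerated
--                 continue
--             t.replace(" ","-")
--             t.replace("_","-")
--             if(toLower):
--                 t = t.lower()
--             ret.append(t)
--     return ret
-- ===== SOURCE B (Python) =====
-- def getTagsFromString(s, toLower=True):
--     # One character-level pass over s + "\n": accumulate a token, flush at '\n' or ','.
--     ret = []
--     cur = []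
--     for ch in s + "\n":
--         if ch == "\n" or ch == ",":
--             t = "".join(cur).strip()
--             if t:
--                 ret.append(t.lower() if toLower else t)
--             cur = []
--         else:
--             cur.append(ch)
--     return ret
-- ===== Notes on version B (the rewrite author's own statement) =====
-- stated objective: alternative
-- what changed: A's two nested splits (by newline, then by comma) are replaced by a single character-level scan of the string plus a trailing newline that accumulates the current token and flushes it (strip, skip empty, optional lower) at each newline or comma; A's result-discarding replace calls are omitted as no-ops.
import Mathlib
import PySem

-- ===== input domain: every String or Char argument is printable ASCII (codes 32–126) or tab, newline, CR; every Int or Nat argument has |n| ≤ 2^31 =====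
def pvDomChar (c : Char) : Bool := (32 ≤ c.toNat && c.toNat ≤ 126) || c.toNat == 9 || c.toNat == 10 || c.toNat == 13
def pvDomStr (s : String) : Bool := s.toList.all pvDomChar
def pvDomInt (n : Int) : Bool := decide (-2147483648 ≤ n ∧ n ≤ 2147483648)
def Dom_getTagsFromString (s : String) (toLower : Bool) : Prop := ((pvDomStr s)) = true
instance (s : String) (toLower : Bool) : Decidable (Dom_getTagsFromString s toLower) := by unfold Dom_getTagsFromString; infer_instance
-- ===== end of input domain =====

-- B replaces A's nested split("\n")/split(",") loops by one character-level scan of s + "\n"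
-- that flushes a token at each '\n' or ',' (objective: alternative decomposition, same cost).

-- ===== PORT A =====
-- A: split on "\n", split each piece on ",", strip, skip empty, optionally lower, append.
-- (A's two `t.replace(...)` calls discard their results in Python; they are omitted as no-ops.)
def getTagsFromString (s : String) (toLower : Bool) : List String :=
  let a := PySem.Chars.splitOn s.toList ['\n']
  a.foldl (fun ret i =>
    (PySem.Chars.splitOn i [',']).foldl (fun ret j =>
      let t := PySem.Chars.strip j
      if t = [] then ret
      else ret ++ [String.ofList (if toLower then PySem.Chars.lower t else t)]) ret) []

-- ===== PORT B =====
-- one pass over s + "\n": cur is the pending token, flushed at each delimiter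
def pvScanB (toLower : Bool) : List Char → List Char → List String → List String
  | [], _cur, ret => ret
  | ch :: cs, cur, ret =>
    if ch = '\n' ∨ ch = ',' then
      let t := PySem.Chars.strip cur
      pvScanB toLower cs []
        (if t = [] then ret
         else ret ++ [String.ofList (if toLower then PySem.Chars.lower t else t)])
    else pvScanB toLower cs (cur ++ [ch]) ret

def getTagsFromString_alt (s : String) (toLower : Bool) : List String :=
  pvScanB toLower (s.toList ++ ['\n']) [] []

-- ===== PRECONDITION & SPEC =====
def Spec_getTagsFromString (s : String) (toLower : Bool) (out : List String) : Prop := out = getTagsFromString_alt s toLower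
instance (s : String) (toLower : Bool) (out : List String) : Decidable (Spec_getTagsFromString s toLower out) := by unfold Spec_getTagsFromString; infer_instance

-- ===== CLAIM (what is proved, stated in full; the proofs are below) =====
def Claim_equal_getTagsFromString : Prop := ∀ (s : String) (toLower : Bool), Dom_getTagsFromString s toLower → Spec_getTagsFromString s toLower (getTagsFromString s toLower)

-- ===== LEMMAS AND PROOFS =====

-- canonical split of a char list on a predicate (spec used only by the proofs)
def pvSp (p : Char → Bool) : List Char → List (List Char)
  | [] => [[]]
  | c :: cs =>
    if p c then [] :: pvSp p cs
    else match pvSp p cs with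
      | [] => [[c]]
      | t :: ts => (c :: t) :: ts

def pvWithHead (pre : List Char) : List (List Char) → List (List Char)
  | [] => [pre]
  | t :: ts => (pre ++ t) :: ts

-- strip every token, drop the empty ones, optionally lower — the shared postprocessing
def pvEmit (toLower : Bool) (toks : List (List Char)) : List String :=
  toks.filterMap (fun tok =>
    let t := PySem.Chars.strip tok
    if t = [] then none
    else some (String.ofList (if toLower then PySem.Chars.lower t else t)))

theorem pvSp_ne_nil (p : Char → Bool) (cs : List Char) : pvSp p cs ≠ [] := by
  cases cs with
  | nil => simp [pvSp]
  | cons c cs =>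
    simp only [pvSp]
    split
    · simp
    · split <;> simp_all

theorem pvSp_cons_ne (p : Char → Bool) (c : Char) (cs : List Char) (h : p c = false) :
    pvSp p (c :: cs) = pvWithHead [c] (pvSp p cs) := by
  cases hq : pvSp p cs with
  | nil => exact absurd hq (pvSp_ne_nil _ _)
  | cons t ts => simp [pvSp, h, hq, pvWithHead]

-- PySem's fuel-based splitOn with a one-char separator is the canonical split pvSp
theorem pvGo1 (ch : Char) (fuel : Nat) : ∀ (l cur : List Char) (accs : List (List Char)),
    l.length < fuel →
    PySem.Chars.splitOn.go [ch] fuel l cur accs =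
      accs.reverse ++ pvWithHead cur.reverse (pvSp (· == ch) l) := by
  induction fuel with
  | zero => intro l cur accs h; omega
  | succ f ih =>
    intro l cur accs h
    cases l with
    | nil => simp [PySem.Chars.splitOn.go, pvSp, pvWithHead]
    | cons c rest =>
      rw [PySem.Chars.splitOn.go]
      by_cases hc : c = ch
      · subst hc
        simp only [List.isPrefixOf, beq_self_eq_true, if_pos, Bool.and_self]
        rw [ih _ _ _ (by simpa using Nat.lt_of_succ_lt_succ h)]
        obtain ⟨t, ts, hts⟩ : ∃ t ts, pvSp (· == c) rest = t :: ts := by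
          cases hq : pvSp (· == c) rest with
          | nil => exact absurd hq (pvSp_ne_nil _ _)
          | cons t ts => exact ⟨t, ts, rfl⟩
        simp [pvSp, pvWithHead, hts]
      · have hb : ([ch].isPrefixOf (c :: rest)) = false := by
          simp [List.isPrefixOf]
          exact fun hq => absurd hq.symm hc
        rw [hb]
        simp only [Bool.false_eq_true, if_false]
        rw [ih _ _ _ (by simpa using Nat.lt_of_succ_lt_succ h)]
        rw [pvSp_cons_ne _ _ _ (by simpa using hc)]
        cases hq : pvSp (· == ch) rest with
        | nil => exact absurd hq (pvSp_ne_nil _ _)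
        | cons t ts => simp [pvWithHead]

theorem pvSplitOn_single (ch : Char) (l : List Char) :
    PySem.Chars.splitOn l [ch] = pvSp (· == ch) l := by
  rw [PySem.Chars.splitOn, pvGo1 ch (l.length + 1) l [] [] (by omega)]
  cases hq : pvSp (· == ch) l with
  | nil => exact absurd hq (pvSp_ne_nil _ _)
  | cons t ts => simp [pvWithHead]

-- B's scan over cs ++ ['\n'] emits exactly the canonical tokens of cs (on both delimiters)
theorem pvScanB_eq (toLower : Bool) (cs : List Char) : ∀ (cur : List Char) (ret : List String),
    pvScanB toLower (cs ++ ['\n']) cur ret =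
      ret ++ pvEmit toLower (pvWithHead cur (pvSp (fun c => c = '\n' || c = ',') cs)) := by
  induction cs with
  | nil =>
    intro cur ret
    by_cases h : PySem.Chars.strip cur = [] <;>
      simp [pvScanB, pvSp, pvWithHead, pvEmit, h]
  | cons c cs ih =>
    intro cur ret
    by_cases hc : c = '\n' ∨ c = ','
    · rw [List.cons_append, pvScanB, if_pos hc, ih]
      have hp : (decide (c = '\n') || decide (c = ',')) = true := by
        simpa [decide_eq_true_eq] using hc
      have hsp : pvSp (fun c => c = '\n' || c = ',') (c :: cs)
          = [] :: pvSp (fun c => c = '\n' || c = ',') cs := by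
        simp only [pvSp, hp, if_pos]
      rw [hsp]
      cases hq : pvSp (fun c => c = '\n' || c = ',') cs with
      | nil => exact absurd hq (pvSp_ne_nil _ _)
      | cons t ts =>
        by_cases hcur : PySem.Chars.strip cur = [] <;>
          simp [pvEmit, pvWithHead, hcur, List.filterMap_cons]
    · rw [List.cons_append, pvScanB, if_neg hc, ih]
      have hp : (fun c => decide (c = '\n') || decide (c = ',')) c = false := by
        simpa [decide_eq_true_eq] using hc
      rw [pvSp_cons_ne _ _ _ hp]
      cases hq : pvSp (fun c => decide (c = '\n') || decide (c = ',')) cs with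
      | nil => exact absurd hq (pvSp_ne_nil _ _)
      | cons t ts => simp [pvWithHead]

-- splitting on both delimiters at once = splitting on '\n' then each piece on ','
theorem pvSp_union (cs : List Char) :
    pvSp (fun c => c = '\n' || c = ',') cs =
      (pvSp (· == '\n') cs).flatMap (pvSp (· == ',')) := by
  induction cs with
  | nil => simp [pvSp]
  | cons c cs ih =>
    by_cases h1 : c = '\n'
    · subst h1
      simp only [pvSp, decide_true, Bool.true_or, if_pos, beq_self_eq_true, List.flatMap_cons, ih]
      simp
    · by_cases h2 : c = ','
      · subst h2
        rw [pvSp_cons_ne (· == '\n') _ _ (by decide)]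
        cases hq : pvSp (· == '\n') cs with
        | nil => exact absurd hq (pvSp_ne_nil _ _)
        | cons t ts =>
          simp only [pvWithHead, List.flatMap_cons, List.singleton_append]
          have hcomma : pvSp (· == ',') (',' :: t) = [] :: pvSp (· == ',') t := by
            simp [pvSp]
          rw [hcomma]
          have lhs : pvSp (fun c => c = '\n' || c = ',') (',' :: cs)
              = [] :: pvSp (fun c => c = '\n' || c = ',') cs := by
            simp [pvSp]
          rw [lhs, ih, hq]
          simp
      · have hp : (fun c => decide (c = '\n') || decide (c = ',')) c = false := by
          simp [h1, h2]
        rw [pvSp_cons_ne _ _ _ hp, pvSp_cons_ne (· == '\n') _ _ (by simp [h1]), ih]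
        cases hq : pvSp (· == '\n') cs with
        | nil => exact absurd hq (pvSp_ne_nil _ _)
        | cons t ts =>
          simp only [pvWithHead, List.flatMap_cons, List.singleton_append]
          rw [pvSp_cons_ne (· == ',') _ _ (by simp [h2])]
          cases hq2 : pvSp (· == ',') t with
          | nil => exact absurd hq2 (pvSp_ne_nil _ _)
          | cons u us => simp [pvWithHead]

-- A's inner append loop over a token list is pvEmit
theorem pvFoldl_emit (toLower : Bool) (toks : List (List Char)) : ∀ (ret : List String),
    toks.foldl (fun ret j =>
      let t := PySem.Chars.strip j
      if t = [] then ret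
      else ret ++ [String.ofList (if toLower then PySem.Chars.lower t else t)]) ret
      = ret ++ pvEmit toLower toks := by
  induction toks with
  | nil => intro ret; simp [pvEmit]
  | cons t ts ih =>
    intro ret
    simp only [List.foldl_cons, pvEmit, List.filterMap_cons]
    rw [ih]
    by_cases h : PySem.Chars.strip t = [] <;> simp [pvEmit, h]

theorem pvA_eq (s : String) (toLower : Bool) :
    getTagsFromString s toLower
      = pvEmit toLower (pvSp (fun c => c = '\n' || c = ',') s.toList) := by
  unfold getTagsFromString
  rw [pvSplitOn_single]
  have houter : ∀ (pieces : List (List Char)) (ret : List String),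
      pieces.foldl (fun ret i =>
        (PySem.Chars.splitOn i [',']).foldl (fun ret j =>
          let t := PySem.Chars.strip j
          if t = [] then ret
          else ret ++ [String.ofList (if toLower then PySem.Chars.lower t else t)]) ret) ret
      = ret ++ pvEmit toLower (pieces.flatMap (pvSp (· == ','))) := by
    intro pieces
    induction pieces with
    | nil => intro ret; simp [pvEmit]
    | cons i is ih =>
      intro ret
      simp only [List.foldl_cons, List.flatMap_cons]
      rw [pvSplitOn_single, pvFoldl_emit, ih]
      simp [pvEmit]
  rw [houter, pvSp_union]
  simp

theorem pvB_eq (s : String) (toLower : Bool) :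
    getTagsFromString_alt s toLower
      = pvEmit toLower (pvSp (fun c => c = '\n' || c = ',') s.toList) := by
  unfold getTagsFromString_alt
  rw [pvScanB_eq]
  cases hq : pvSp (fun c => c = '\n' || c = ',') s.toList with
  | nil => exact absurd hq (pvSp_ne_nil _ _)
  | cons t ts => simp [pvWithHead]

-- ===== VERDICT (by name: the statement is the Claim_ definition above) =====
theorem getTagsFromString_spec : Claim_equal_getTagsFromString := by
  intro s toLower _
  unfold Spec_getTagsFromString
  rw [pvA_eq, pvB_eq]
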